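-- pv_equiv track=rewrite | github.com/faizzuns/Battleships | bot.py | CrossWorth
-- ===== SOURCE A (Python) =====
-- def CrossWorth(shots,x, y):
--     #Mengembalikan jumlah petak silang dengan titik pusat(x,y) yang belum tertembak
--     N = 0
--     for cell in shots:
--         if (cell[0]==x+1 and cell[1]==y+1):
--             N += 1
--         if (cell[0]==x-1 and cell[1]==y+1):
--             N += 1
--         if (cell[0]==x+1 and cell[1]==y-1):
--             N += 1
--         if (cell[0]==x-1 and cell[1]==y-1):
--             N += 1
--     return N
-- ===== SOURCE B (Python) =====
-- from bisect import bisect_left, bisect_right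
--
-- def CrossWorth(shots, x, y):
--     total = 0
--     for cx in (x - 1, x + 1):
--         col = sorted(cell[1] for cell in shots if cell[0] == cx)
--         for cy in (y - 1, y + 1):
--             total += bisect_right(col, cy) - bisect_left(col, cy)
--     return total
-- ===== Notes on version B (the rewrite author's own statement) =====
-- stated objective: alternative
-- what changed: B builds, for each of the two diagonal columns x-1 and x+1, a sorted list of the y-coordinates of the shots in that column and counts the two diagonal rows by binary search (bisect_right - bisect_left), instead of A's single linear scan testing four equality branches per cell.
import Mathlib
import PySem

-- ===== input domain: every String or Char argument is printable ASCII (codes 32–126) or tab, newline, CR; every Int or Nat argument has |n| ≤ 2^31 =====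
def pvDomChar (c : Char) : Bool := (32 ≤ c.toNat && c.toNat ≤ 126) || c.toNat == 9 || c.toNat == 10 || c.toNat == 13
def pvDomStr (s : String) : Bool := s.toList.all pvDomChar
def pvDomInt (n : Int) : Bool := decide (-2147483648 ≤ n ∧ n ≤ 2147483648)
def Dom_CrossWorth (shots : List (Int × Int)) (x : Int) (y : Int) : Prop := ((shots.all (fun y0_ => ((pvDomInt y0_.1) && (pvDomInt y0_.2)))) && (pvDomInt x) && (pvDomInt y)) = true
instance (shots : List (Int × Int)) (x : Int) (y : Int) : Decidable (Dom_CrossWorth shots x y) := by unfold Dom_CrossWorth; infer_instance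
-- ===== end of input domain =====

-- B sorts each diagonal column's y-coordinates and counts the two diagonal rows by binary
-- search (bisect), an alternative sort-and-search algorithm to A's linear scan with four tests.


-- ===== PORT A =====
def CrossWorth (shots : List (Int × Int)) (x : Int) (y : Int) : Int :=
  shots.foldl (fun N cell =>
    let N := if cell.1 == x + 1 && cell.2 == y + 1 then N + 1 else N
    let N := if cell.1 == x - 1 && cell.2 == y + 1 then N + 1 else N
    let N := if cell.1 == x + 1 && cell.2 == y - 1 then N + 1 else N
    let N := if cell.1 == x - 1 && cell.2 == y - 1 then N + 1 else N
    N) 0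

-- ===== PORT B =====
def CrossWorth_alt (shots : List (Int × Int)) (x : Int) (y : Int) : Int :=
  [x - 1, x + 1].foldl (fun total cx =>
    let col := PySem.List.sorted ((shots.filter (fun cell => cell.1 == cx)).map (fun cell => cell.2)) (fun v => v) false
    [y - 1, y + 1].foldl (fun total cy =>
      total + ((PySem.List.bisectRight col cy : Int) - (PySem.List.bisectLeft col cy : Int))) total) 0

-- ===== PRECONDITION & SPEC =====
def Spec_CrossWorth (shots : List (Int × Int)) (x : Int) (y : Int) (out : Int) : Prop := out = CrossWorth_alt shots x y
instance (shots : List (Int × Int)) (x : Int) (y : Int) (out : Int) : Decidable (Spec_CrossWorth shots x y out) := by unfold Spec_CrossWorth; infer_instance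

-- ===== CLAIM (what is proved, stated in full; the proofs are below) =====
def Claim_equal_CrossWorth : Prop := ∀ (shots : List (Int × Int)) (x : Int) (y : Int), Dom_CrossWorth shots x y → Spec_CrossWorth shots x y (CrossWorth shots x y)

-- ===== LEMMAS AND PROOFS =====

-- A's loop, started at any accumulator N, adds the four corner counts.
theorem crossWorth_foldl_count (x y : Int) (l : List (Int × Int)) (N : Int) :
    l.foldl (fun N cell =>
      let N := if cell.1 == x + 1 && cell.2 == y + 1 then N + 1 else N
      let N := if cell.1 == x - 1 && cell.2 == y + 1 then N + 1 else N
      let N := if cell.1 == x + 1 && cell.2 == y - 1 then N + 1 else N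
      let N := if cell.1 == x - 1 && cell.2 == y - 1 then N + 1 else N
      N) N
    = N + (l.count (x + 1, y + 1) : Int) + (l.count (x - 1, y + 1) : Int)
        + (l.count (x + 1, y - 1) : Int) + (l.count (x - 1, y - 1) : Int) := by
  induction l generalizing N with
  | nil => simp
  | cons a t ih =>
    obtain ⟨p, q⟩ := a
    simp only [List.foldl_cons, List.count_cons, ih]
    have hpair : ∀ u v : Int, (((p, q) == (u, v)) = (p == u && q == v)) := fun _ _ => rfl
    simp only [hpair]
    push_cast
    split_ifs <;> simp only [Bool.and_eq_true, beq_iff_eq] at * <;> omega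

-- On a sorted Int list, bisect_right - bisect_left is the number of occurrences.
theorem bisect_sub_eq_count (col : List Int) (v : Int)
    (hs : col.Pairwise (fun a b => a ≤ b)) :
    (PySem.List.bisectRight col v : Int) - (PySem.List.bisectLeft col v : Int)
      = (col.count v : Int) := by
  obtain ⟨hrlen, hrlow, hrhigh⟩ := PySem.List.bisectRight_spec col v hs
  obtain ⟨hllen, hllow, hlhigh⟩ := PySem.List.bisectLeft_spec col v hs
  set bl := PySem.List.bisectLeft col v with hbl
  set br := PySem.List.bisectRight col v with hbr
  have hle : bl ≤ br := by
    by_contra h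
    have hlt : br < bl := Nat.lt_of_not_le h
    have hbrlt : br < col.length := lt_of_lt_of_le hlt hllen
    have h1 := hllow br hbrlt hlt
    have h2 := hrhigh br hbrlt (le_refl _)
    omega
  have hsplit : col = col.take bl ++ ((col.drop bl).take (br - bl) ++ col.drop br) := by
    rw [← List.take_append_drop bl col]
    congr 1
    · simp
    · rw [List.take_append_drop bl col]
      rw [← List.take_append_drop (br - bl) (col.drop bl)]
      congr 1
      · simp
      · rw [List.drop_drop]
        congr 1
        omega
  have hcnt1 : (col.take bl).count v = 0 := by
    rw [List.count_eq_zero]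
    intro hmem
    rw [List.mem_iff_getElem] at hmem
    obtain ⟨j, hj, hje⟩ := hmem
    have hjb : j < bl := by
      have := List.length_take_le bl col
      omega
    have hjc : j < col.length := by
      have := hllen; omega
    rw [List.getElem_take] at hje
    have := hllow j hjc hjb
    omega
  have hcnt3 : (col.drop br).count v = 0 := by
    rw [List.count_eq_zero]
    intro hmem
    rw [List.mem_iff_getElem] at hmem
    obtain ⟨j, hj, hje⟩ := hmem
    rw [List.getElem_drop] at hje
    have hjc : br + j < col.length := by
      rw [List.length_drop] at hj; omega
    have := hrhigh (br + j) hjc (by omega)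
    omega
  have hcnt2 : ((col.drop bl).take (br - bl)).count v = br - bl := by
    have hall : ∀ b ∈ (col.drop bl).take (br - bl), v = b := by
      intro b hmem
      rw [List.mem_iff_getElem] at hmem
      obtain ⟨j, hj, hje⟩ := hmem
      have hjlt : j < br - bl := by
        have := List.length_take_le (br - bl) (col.drop bl)
        omega
      have hjd : j < (col.drop bl).length := by
        have := List.length_take_le (br - bl) (col.drop bl)
        simp at hj ⊢
        omega
      rw [List.getElem_take, List.getElem_drop] at hje
      have hjc : bl + j < col.length := by
        rw [List.length_drop] at hjd; omega
      have h1 := hlhigh (bl + j) hjc (by omega)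
      have h2 := hrlow (bl + j) hjc (by omega)
      omega
    have hlen : ((col.drop bl).take (br - bl)).length = br - bl := by
      rw [List.length_take, List.length_drop]
      omega
    have h := List.count_eq_length.mpr hall
    rw [hlen] at h
    exact h
  have := congrArg (fun l => List.count v l) hsplit
  simp only [List.count_append] at this
  rw [this, hcnt1, hcnt2, hcnt3]
  push_cast
  omega

-- B's per-column sorted list counts cy exactly as shots counts (cx, cy).
theorem col_count (shots : List (Int × Int)) (cx cy : Int) :
    (PySem.List.sorted ((shots.filter (fun cell => cell.1 == cx)).map (fun cell => cell.2)) (fun v => v) false).count cy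
      = shots.count (cx, cy) := by
  rw [(PySem.List.sorted_perm _ _ _).count_eq]
  induction shots with
  | nil => simp
  | cons a t ih =>
    obtain ⟨p, q⟩ := a
    by_cases hp : p = cx
    · simp only [List.filter_cons, hp, beq_self_eq_true, if_pos, List.map_cons,
        List.count_cons, ih]
      have : (((cx, q) : Int × Int) == (cx, cy)) = (q == cy) := by
        simp [Prod.ext_iff]
      rw [this]
    · have hb : ((p : Int) == cx) = false := by simp [hp]
      have hb2 : (((p, q) : Int × Int) == (cx, cy)) = false := by
        simp [Prod.ext_iff, hp]
      simp [hb, List.count_cons, ih, hb2]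

theorem CrossWorth_spec : Claim_equal_CrossWorth := by
  intro shots x y _
  unfold Spec_CrossWorth CrossWorth CrossWorth_alt
  rw [crossWorth_foldl_count]
  simp only [List.foldl_cons, List.foldl_nil]
  rw [bisect_sub_eq_count _ _ (PySem.List.sorted_pairwise _ _),
      bisect_sub_eq_count _ _ (PySem.List.sorted_pairwise _ _),
      bisect_sub_eq_count _ _ (PySem.List.sorted_pairwise _ _),
      bisect_sub_eq_count _ _ (PySem.List.sorted_pairwise _ _)]
  rw [col_count, col_count, col_count, col_count]
  omega
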